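-- pv_equiv track=rewrite | github.com/kreolsky/gsconfig | gsconfig/tools.py | define_split_points
-- ===== SOURCE A (Python) =====
-- def define_split_points(string, sep, br):
--     """
--     Отпределение позиции всех разделяющих строку символов.
--     Игнорирует разделители внутри блоков выделенных скобками br.
--
--     string - исходная строка для разбора
--     sep - разделитель. Пример: sep = '|'
--     br - тип скобок выделяющих подблоки. Пример: br = '{}'
--
--     Генератор. Возвращает индексы разделяющих символов.
--     """
--
--     br = {br[0]: 1, br[-1]: -1}
--     count = 0
--
--     for i, letter in enumerate(string):
--         if letter in br:
--             count += br[letter]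
--
--         elif letter == sep and count == 0:
--             yield i
--
--     yield len(string)
-- ===== SOURCE B (Python) =====
-- def define_split_points(string, sep, br):
--     # Two-pass rewrite: precompute a prefix-depth table, then filter.
--     delta = {br[0]: 1, br[-1]: -1}
--     depth = []
--     d = 0
--     for ch in string:
--         depth.append(d)
--         d += delta.get(ch, 0)
--     for i, ch in enumerate(string):
--         if ch == sep and ch not in delta and depth[i] == 0:
--             yield i
--     yield len(string)
-- ===== Notes on version B (the rewrite author's own statement) =====
-- stated objective: alternative
-- what changed: Replaces A's fused scan (one running counter deciding yields on the fly) with two separate passes: first a precomputed prefix-depth table, then an independent filtering pass over enumerate(string) that consults the table.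
-- outside the precondition, e.g. on define_split_points('a|b', '|', ''): A raises IndexError, B raises IndexError
import Mathlib
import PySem

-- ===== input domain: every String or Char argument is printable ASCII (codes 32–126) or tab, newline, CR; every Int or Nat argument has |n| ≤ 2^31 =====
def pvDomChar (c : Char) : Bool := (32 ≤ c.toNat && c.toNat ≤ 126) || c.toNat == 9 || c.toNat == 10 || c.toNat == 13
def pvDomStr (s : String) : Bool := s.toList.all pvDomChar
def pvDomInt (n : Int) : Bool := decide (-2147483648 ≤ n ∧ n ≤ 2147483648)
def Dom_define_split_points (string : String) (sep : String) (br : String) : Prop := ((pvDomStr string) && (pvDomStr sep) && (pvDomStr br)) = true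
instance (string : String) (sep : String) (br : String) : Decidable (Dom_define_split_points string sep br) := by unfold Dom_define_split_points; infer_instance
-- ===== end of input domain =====

-- B replaces A's fused counter-tracking scan by two passes (prefix-depth table, then a
-- filtering pass); same O(n) cost, different decomposition. Both Pythons are generators;
-- the equivalence is about the list of yielded values.

-- ===== PORT A =====
-- br = {br[0]: 1, br[-1]: -1}  (br nonempty under Pre_)
def dspBrDict (br : List Char) : PySem.Dict Char Int :=
  PySem.Dict.insert (PySem.Dict.insert PySem.Dict.empty (br.headD ' ') 1) (br.getLastD ' ') (-1)

-- the `for i, letter in enumerate(string)` loop of A, carrying (index, count)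
def dspLoopA (d : PySem.Dict Char Int) (sep : List Char) :
    List Char → Int → Int → List Int
  | [], _, _ => []
  | c :: rest, i, count =>
    if PySem.Dict.contains d c then
      dspLoopA d sep rest (i + 1) (count + PySem.Dict.getD d c 0)
    else if sep = [c] ∧ count = 0 then
      i :: dspLoopA d sep rest (i + 1) count
    else
      dspLoopA d sep rest (i + 1) count

def define_split_points (string : String) (sep : String) (br : String) : List Int :=
  dspLoopA (dspBrDict br.toList) sep.toList string.toList 0 0
    ++ [(string.toList.length : Int)]

-- ===== PORT B =====
-- first pass of Source B: depth.append(d); d += delta.get(ch, 0)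
def dspDepths (d : PySem.Dict Char Int) : List Char → Int → List Int
  | [], _ => []
  | c :: rest, acc => acc :: dspDepths d rest (acc + PySem.Dict.getD d c 0)

-- second pass of Source B: filter enumerate(string) by the depth table
def dspFilterB (d : PySem.Dict Char Int) (sep : List Char) (depth : List Int) :
    List (Int × Char) → List Int
  | [] => []
  | (i, c) :: rest =>
    if sep = [c] ∧ ¬ PySem.Dict.contains d c ∧ PySem.List.pyGetD depth i 0 = 0 then
      i :: dspFilterB d sep depth rest
    else
      dspFilterB d sep depth rest

def define_split_points_alt (string : String) (sep : String) (br : String) : List Int :=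
  let delta := dspBrDict br.toList
  let depth := dspDepths delta string.toList 0
  dspFilterB delta sep.toList depth (PySem.List.enumerate string.toList 0)
    ++ [(string.toList.length : Int)]

-- ===== PRECONDITION & SPEC =====
-- A's `br[0]` raises IndexError on the empty bracket string, so br = "" is excluded.
def Pre_define_split_points (string : String) (sep : String) (br : String) : Prop :=
  br ≠ ""
instance (string : String) (sep : String) (br : String) : Decidable (Pre_define_split_points string sep br) := by unfold Pre_define_split_points; infer_instance

def pvWitness_define_split_points : String × String × String := ("a|{b|c}|d", "|", "{}")

def Spec_define_split_points (string : String) (sep : String) (br : String) (out : List Int) : Prop := out = define_split_points_alt string sep br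
instance (string : String) (sep : String) (br : String) (out : List Int) : Decidable (Spec_define_split_points string sep br out) := by unfold Spec_define_split_points; infer_instance

-- ===== CLAIM (what is proved, stated in full; the proofs are below) =====
def Claim_equal_define_split_points : Prop := ∀ (string : String) (sep : String) (br : String), Dom_define_split_points string sep br → Pre_define_split_points string sep br → Spec_define_split_points string sep br (define_split_points string sep br)

-- ===== LEMMAS AND PROOFS =====

-- the depth table entry at position P.length is the running count there
lemma dsp_getD_append (P : List Int) (count : Int) (t : List Int) :
    PySem.List.pyGetD (P ++ count :: t) ((P.length : Int)) 0 = count := by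
  simp [PySem.List.pyGetD_natCast]

-- main invariant: A's fused loop from index |P| with counter `count` equals B's filter
-- over the remaining enumerate pairs, reading the depth table P ++ dspDepths d s count
lemma dsp_main (d : PySem.Dict Char Int) (sep : List Char) :
    ∀ (s : List Char) (P : List Int) (count : Int),
      dspLoopA d sep s (P.length : Int) count =
      dspFilterB d sep (P ++ dspDepths d s count)
        (PySem.List.enumerate s (P.length : Int)) := by
  intro s
  induction s with
  | nil => intro P count; simp [dspLoopA, dspDepths, dspFilterB, PySem.List.enumerate_nil]
  | cons c rest ih =>
    intro P count
    rw [PySem.List.enumerate_cons]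
    simp only [dspLoopA, dspDepths, dspFilterB]
    have hget := dsp_getD_append P count (dspDepths d rest (count + PySem.Dict.getD d c 0))
    have hP1 : ((P.length : Int) + 1) = (((P ++ [count]).length : Nat) : Int) := by
      simp
    have hD : P ++ count :: dspDepths d rest (count + PySem.Dict.getD d c 0)
        = (P ++ [count]) ++ dspDepths d rest (count + PySem.Dict.getD d c 0) := by
      simp
    by_cases hc : PySem.Dict.contains d c
    · -- bracket character: A adds to count, B's condition fails on ¬contains
      rw [if_pos hc, if_neg (by simp [hc])]
      rw [hP1, hD, ih]
    · have hδ : PySem.Dict.getD d c 0 = 0 :=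
        PySem.Dict.getD_of_not_contains d 0 (by simpa using hc)
      rw [if_neg hc]
      by_cases hs : sep = [c] ∧ count = 0
      · rw [if_pos hs, if_pos (by exact ⟨hs.1, by simpa using hc, by rw [hget, hs.2]⟩)]
        rw [hP1, hD, hδ, add_zero, ih]
      · rw [if_neg hs, if_neg (by
          rintro ⟨h1, -, h3⟩
          exact hs ⟨h1, by rwa [hget] at h3⟩)]
        rw [hP1, hD, hδ, add_zero, ih]

-- ===== VERDICT (by name: the statement is the Claim_ definition above) =====
theorem define_split_points_spec : Claim_equal_define_split_points := by
  intro string sep br _ _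
  unfold Spec_define_split_points define_split_points define_split_points_alt
  have := dsp_main (dspBrDict br.toList) sep.toList string.toList [] 0
  simpa using congrArg (· ++ [(string.toList.length : Int)]) this
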